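-- pv_equiv track=rewrite | github.com/FaRinZZZZ/granite-hack | testv2.py | find_destination
-- ===== SOURCE A (Python) =====
-- from typing import Optional
--
-- def find_destination(query: str) -> Optional[str]:
--     """
--     Your manual substring checks for relevant store zones.
--     """
--     query_lower = query.lower()
--     if "bed" in query_lower or "furniture" in query_lower:
--         return "furniture"
--     elif "restroom" in query_lower or "bathroom" in query_lower:
--         return "restroom"
--     elif "food" in query_lower or "grocery" in query_lower:
--         return "food"
--     elif any(x in query_lower for x in ["electronics", "tv", "phone"]):
--         return "electronics"
--     elif "tools" in query_lower:
--         return "tools"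
--     elif "baby" in query_lower or "kids" in query_lower:
--         return "baby_kids"
--     elif "clothing" in query_lower or "apparel" in query_lower:
--         return "clothing"
--     elif "miscellaneous" in query_lower or "gifts" in query_lower:
--         return "miscellaneous"
--     else:
--         return None
-- ===== SOURCE B (Python) =====
-- from typing import Optional
--
-- # Flat keyword -> priority map (priority = index of A's branch) and a zone table.
-- KEYWORD_PRIORITY = {
--     "bed": 0, "furniture": 0,
--     "restroom": 1, "bathroom": 1,
--     "food": 2, "grocery": 2,
--     "electronics": 3, "tv": 3, "phone": 3,
--     "tools": 4,
--     "baby": 5, "kids": 5,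
--     "clothing": 6, "apparel": 6,
--     "miscellaneous": 7, "gifts": 7,
-- }
-- ZONES = ["furniture", "restroom", "food", "electronics", "tools",
--          "baby_kids", "clothing", "miscellaneous"]
--
-- def find_destination(query: str) -> Optional[str]:
--     # Scan ALL keywords, keep the minimum priority among those that occur;
--     # the zone of minimal priority is exactly the first branch A would take.
--     q = query.lower()
--     best = None
--     for kw, pri in KEYWORD_PRIORITY.items():
--         if kw in q and (best is None or pri < best):
--             best = pri
--     return ZONES[best] if best is not None else None
-- ===== Notes on version B (the rewrite author's own statement) =====
-- stated objective: alternative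
-- what changed: Instead of A's first-match if/elif ladder that returns at the first matching branch, B scans a flat keyword->priority map in full, keeps the minimum priority among all matching keywords, and indexes a zone table with it.
import Mathlib
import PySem

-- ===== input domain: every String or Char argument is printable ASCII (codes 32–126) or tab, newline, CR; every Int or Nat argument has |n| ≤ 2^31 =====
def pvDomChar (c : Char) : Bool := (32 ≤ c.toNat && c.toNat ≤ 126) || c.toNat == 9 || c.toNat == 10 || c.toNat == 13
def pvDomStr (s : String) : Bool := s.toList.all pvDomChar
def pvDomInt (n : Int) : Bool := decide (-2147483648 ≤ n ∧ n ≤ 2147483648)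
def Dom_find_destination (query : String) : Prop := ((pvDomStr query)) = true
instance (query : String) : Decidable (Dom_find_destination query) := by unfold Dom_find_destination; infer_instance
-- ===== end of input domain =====

-- B replaces A's first-match if/elif ladder by a min-priority scan over a flat keyword->priority map (alternative algorithm, same cost).


-- ===== PORT A =====
def find_destination (query : String) : Option String :=
  let ql := PySem.Str.lower query
  if PySem.Str.isIn "bed" ql || PySem.Str.isIn "furniture" ql then some "furniture"
  else if PySem.Str.isIn "restroom" ql || PySem.Str.isIn "bathroom" ql then some "restroom"
  else if PySem.Str.isIn "food" ql || PySem.Str.isIn "grocery" ql then some "food"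
  else if (["electronics", "tv", "phone"].any (fun x => PySem.Str.isIn x ql)) then some "electronics"
  else if PySem.Str.isIn "tools" ql then some "tools"
  else if PySem.Str.isIn "baby" ql || PySem.Str.isIn "kids" ql then some "baby_kids"
  else if PySem.Str.isIn "clothing" ql || PySem.Str.isIn "apparel" ql then some "clothing"
  else if PySem.Str.isIn "miscellaneous" ql || PySem.Str.isIn "gifts" ql then some "miscellaneous"
  else none

-- ===== PORT B =====
-- KEYWORD_PRIORITY as an association list in insertion order; ZONES as a list.
def pvKeywordPriority : List (String × Nat) :=
  [("bed", 0), ("furniture", 0),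
   ("restroom", 1), ("bathroom", 1),
   ("food", 2), ("grocery", 2),
   ("electronics", 3), ("tv", 3), ("phone", 3),
   ("tools", 4),
   ("baby", 5), ("kids", 5),
   ("clothing", 6), ("apparel", 6),
   ("miscellaneous", 7), ("gifts", 7)]

def pvZones : List String :=
  ["furniture", "restroom", "food", "electronics", "tools",
   "baby_kids", "clothing", "miscellaneous"]

def find_destination_alt (query : String) : Option String :=
  let q := PySem.Str.lower query
  let best :=
    pvKeywordPriority.foldl
      (fun (best : Option Nat) kp =>
        if PySem.Str.isIn kp.1 q && (best.isNone || decide (kp.2 < best.getD 0))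
        then some kp.2 else best)
      none
  match best with
  | some i => PySem.List.pyGet? pvZones (Int.ofNat i)   -- ZONES[best]; i < 8 always, so this is some _
  | none => none

-- ===== PRECONDITION & SPEC =====
def Spec_find_destination (query : String) (out : Option String) : Prop := out = find_destination_alt query
instance (query : String) (out : Option String) : Decidable (Spec_find_destination query out) := by unfold Spec_find_destination; infer_instance

-- ===== CLAIM (what is proved, stated in full; the proofs are below) =====
def Claim_equal_find_destination : Prop := ∀ (query : String), Dom_find_destination query → Spec_find_destination query (find_destination query)

-- ===== LEMMAS AND PROOFS =====

-- Both ports depend on the query only through the 16 booleans 'keyword in query.lower()':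
-- abstract them out and check all 2^16 combinations by decide.
def pvLadderG (b1 b2 b3 b4 b5 b6 b7 b8 b9 b10 b11 b12 b13 b14 b15 b16 : Bool) : Option String :=
  if b1 || b2 then some "furniture"
  else if b3 || b4 then some "restroom"
  else if b5 || b6 then some "food"
  else if b7 || b8 || b9 then some "electronics"
  else if b10 then some "tools"
  else if b11 || b12 then some "baby_kids"
  else if b13 || b14 then some "clothing"
  else if b15 || b16 then some "miscellaneous"
  else none

def pvStep (b : Bool) (p : Nat) (best : Option Nat) : Option Nat :=
  if b && (best.isNone || decide (p < best.getD 0)) then some p else best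

def pvFoldG (b1 b2 b3 b4 b5 b6 b7 b8 b9 b10 b11 b12 b13 b14 b15 b16 : Bool) : Option String :=
  match pvStep b16 7 (pvStep b15 7 (pvStep b14 6 (pvStep b13 6 (pvStep b12 5 (pvStep b11 5
        (pvStep b10 4 (pvStep b9 3 (pvStep b8 3 (pvStep b7 3 (pvStep b6 2 (pvStep b5 2
        (pvStep b4 1 (pvStep b3 1 (pvStep b2 0 (pvStep b1 0 none))))))))))))))) with
  | some i => PySem.List.pyGet? pvZones (Int.ofNat i)
  | none => none

set_option maxHeartbeats 4000000 in
theorem pvGeneric :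
    ∀ b1 b2 b3 b4 b5 b6 b7 b8 b9 b10 b11 b12 b13 b14 b15 b16 : Bool,
      pvLadderG b1 b2 b3 b4 b5 b6 b7 b8 b9 b10 b11 b12 b13 b14 b15 b16 =
      pvFoldG b1 b2 b3 b4 b5 b6 b7 b8 b9 b10 b11 b12 b13 b14 b15 b16 := by
  decide

theorem pvA_eq (query : String) :
    find_destination query =
      pvLadderG (PySem.Str.isIn "bed" (PySem.Str.lower query)) (PySem.Str.isIn "furniture" (PySem.Str.lower query))
        (PySem.Str.isIn "restroom" (PySem.Str.lower query)) (PySem.Str.isIn "bathroom" (PySem.Str.lower query))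
        (PySem.Str.isIn "food" (PySem.Str.lower query)) (PySem.Str.isIn "grocery" (PySem.Str.lower query))
        (PySem.Str.isIn "electronics" (PySem.Str.lower query)) (PySem.Str.isIn "tv" (PySem.Str.lower query))
        (PySem.Str.isIn "phone" (PySem.Str.lower query)) (PySem.Str.isIn "tools" (PySem.Str.lower query))
        (PySem.Str.isIn "baby" (PySem.Str.lower query)) (PySem.Str.isIn "kids" (PySem.Str.lower query))
        (PySem.Str.isIn "clothing" (PySem.Str.lower query)) (PySem.Str.isIn "apparel" (PySem.Str.lower query))
        (PySem.Str.isIn "miscellaneous" (PySem.Str.lower query)) (PySem.Str.isIn "gifts" (PySem.Str.lower query)) := by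
  simp [find_destination, pvLadderG, List.any, or_assoc]

theorem pvB_eq (query : String) :
    find_destination_alt query =
      pvFoldG (PySem.Str.isIn "bed" (PySem.Str.lower query)) (PySem.Str.isIn "furniture" (PySem.Str.lower query))
        (PySem.Str.isIn "restroom" (PySem.Str.lower query)) (PySem.Str.isIn "bathroom" (PySem.Str.lower query))
        (PySem.Str.isIn "food" (PySem.Str.lower query)) (PySem.Str.isIn "grocery" (PySem.Str.lower query))
        (PySem.Str.isIn "electronics" (PySem.Str.lower query)) (PySem.Str.isIn "tv" (PySem.Str.lower query))
        (PySem.Str.isIn "phone" (PySem.Str.lower query)) (PySem.Str.isIn "tools" (PySem.Str.lower query))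
        (PySem.Str.isIn "baby" (PySem.Str.lower query)) (PySem.Str.isIn "kids" (PySem.Str.lower query))
        (PySem.Str.isIn "clothing" (PySem.Str.lower query)) (PySem.Str.isIn "apparel" (PySem.Str.lower query))
        (PySem.Str.isIn "miscellaneous" (PySem.Str.lower query)) (PySem.Str.isIn "gifts" (PySem.Str.lower query)) := by
  rfl

-- ===== VERDICT (by name: the statement is the Claim_ definition above) =====
theorem find_destination_spec : Claim_equal_find_destination := by
  intro query _
  unfold Spec_find_destination
  rw [pvA_eq, pvB_eq]
  exact pvGeneric _ _ _ _ _ _ _ _ _ _ _ _ _ _ _ _
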